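-- pv_equiv track=rewrite | github.com/Rodrigolfaria/Weekly-Report | report_flat_time.py | looks_like_flat_time_csv
-- ===== SOURCE A (Python) =====
-- def looks_like_flat_time_csv(rows: list[list[str]]) -> bool:
--     first_column = {(row[0] if row else "").strip() for row in rows}
--     if "Subject Well" not in first_column or "Group Name" not in first_column or "Activity" not in first_column:
--         return False
--
--     for row in rows:
--         if not row or (row[0] or "").strip() != "Activity":
--             continue
--         labels = [str(cell or "").strip().lower() for cell in row[1:]]
--         if any(label.startswith("mean") for label in labels) and any(label.startswith("median") for label in labels):
--             return True
--     return False
-- ===== SOURCE B (Python) =====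
-- def looks_like_flat_time_csv(rows: list[list[str]]) -> bool:
--     seen_subject = seen_group = found_valid = False
--     for row in rows:
--         label = (row[0] if row else "").strip()
--         if label == "Subject Well":
--             seen_subject = True
--         elif label == "Group Name":
--             seen_group = True
--         elif label == "Activity" and not found_valid:
--             labels = [str(cell or "").strip().lower() for cell in row[1:]]
--             if any(l.startswith("mean") for l in labels) and any(l.startswith("median") for l in labels):
--                 found_valid = True
--     return seen_subject and seen_group and found_valid
-- ===== Notes on version B (the rewrite author's own statement) =====
-- stated objective: simpler
-- what changed: Replaces A's two-phase approach (build a set of all first-column labels, test three memberships, then rescan the rows for a valid Activity row) by one single pass that maintains three boolean flags and returns their conjunction; no set is built and the rows are traversed once.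
import Mathlib
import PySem

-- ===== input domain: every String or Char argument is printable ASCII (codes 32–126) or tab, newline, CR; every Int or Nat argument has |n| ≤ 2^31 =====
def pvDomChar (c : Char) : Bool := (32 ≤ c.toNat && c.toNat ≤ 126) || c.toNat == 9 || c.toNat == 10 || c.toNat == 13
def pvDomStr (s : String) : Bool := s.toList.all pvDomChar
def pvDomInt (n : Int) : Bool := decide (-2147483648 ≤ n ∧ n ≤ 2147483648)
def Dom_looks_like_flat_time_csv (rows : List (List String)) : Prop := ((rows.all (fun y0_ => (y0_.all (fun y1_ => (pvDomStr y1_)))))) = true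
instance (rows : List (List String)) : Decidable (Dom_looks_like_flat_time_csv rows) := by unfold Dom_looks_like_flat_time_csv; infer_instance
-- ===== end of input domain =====

-- B replaces A's build-a-set-then-rescan structure by one single pass keeping three boolean flags (same cost; simpler).


-- ===== PORT A =====
-- labels of the cells after the first one: [str(cell or "").strip().lower() for cell in row[1:]]
def pvLabels (row : List String) : List String :=
  (row.drop 1).map (fun cell => PySem.Str.lower (PySem.Str.strip cell))

-- the for-loop of A: scan for an "Activity" row with a mean- and a median-labelled cell
def pvActLoop : List (List String) → Bool
  | [] => false
  | row :: rest =>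
    if row.isEmpty || (PySem.Str.strip (row.headD "") != "Activity") then pvActLoop rest
    else
      let labels := pvLabels row
      if (labels.any (fun l => PySem.Str.startswith l "mean")) &&
         (labels.any (fun l => PySem.Str.startswith l "median")) then true
      else pvActLoop rest

def looks_like_flat_time_csv (rows : List (List String)) : Bool :=
  let first_column : PySem.Set String :=
    PySem.Set.ofList (rows.map (fun row => PySem.Str.strip (row.headD "")))
  if !(PySem.Set.contains first_column "Subject Well") ||
     !(PySem.Set.contains first_column "Group Name") ||
     !(PySem.Set.contains first_column "Activity") then false
  else pvActLoop rows

-- ===== PORT B =====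
-- single pass: (seen_subject, seen_group, found_valid) flags
def pvAltStep (st : Bool × Bool × Bool) (row : List String) : Bool × Bool × Bool :=
  let label := PySem.Str.strip (row.headD "")
  if label == "Subject Well" then (true, st.2.1, st.2.2)
  else if label == "Group Name" then (st.1, true, st.2.2)
  else if label == "Activity" && !st.2.2 then
    let labels := (row.drop 1).map (fun cell => PySem.Str.lower (PySem.Str.strip cell))
    if (labels.any (fun l => PySem.Str.startswith l "mean")) &&
       (labels.any (fun l => PySem.Str.startswith l "median")) then (st.1, st.2.1, true)
    else st
  else st

def looks_like_flat_time_csv_alt (rows : List (List String)) : Bool :=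
  let st := rows.foldl pvAltStep (false, false, false)
  st.1 && st.2.1 && st.2.2

-- ===== PRECONDITION & SPEC =====
def Spec_looks_like_flat_time_csv (rows : List (List String)) (out : Bool) : Prop := out = looks_like_flat_time_csv_alt rows
instance (rows : List (List String)) (out : Bool) : Decidable (Spec_looks_like_flat_time_csv rows out) := by unfold Spec_looks_like_flat_time_csv; infer_instance

-- ===== CLAIM (what is proved, stated in full; the proofs are below) =====
def Claim_equal_looks_like_flat_time_csv : Prop := ∀ (rows : List (List String)), Dom_looks_like_flat_time_csv rows → Spec_looks_like_flat_time_csv rows (looks_like_flat_time_csv rows)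

-- ===== LEMMAS AND PROOFS =====
def pvLab (row : List String) : String := PySem.Str.strip (row.headD "")

def pvMM (row : List String) : Bool :=
  ((pvLabels row).any (fun l => PySem.Str.startswith l "mean")) &&
  ((pvLabels row).any (fun l => PySem.Str.startswith l "median"))

def pvPF (row : List String) : Bool := (pvLab row == "Activity") && pvMM row

theorem pvLab_nil : pvLab [] = "" := by decide

theorem pvActLoop_eq (rows : List (List String)) : pvActLoop rows = rows.any pvPF := by
  induction rows with
  | nil => rfl
  | cons row rest ih =>
    show (if row.isEmpty || (pvLab row != "Activity") then pvActLoop rest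
          else if pvMM row = true then true else pvActLoop rest)
         = (pvPF row || rest.any pvPF)
    by_cases hA : pvLab row = "Activity"
    · have hne : row.isEmpty = false := by
        cases row with
        | nil => rw [pvLab_nil] at hA; exact absurd hA (by decide)
        | cons a t => rfl
      have hbne : (pvLab row != "Activity") = false := by rw [hA]; decide
      rw [hne, hbne]
      cases hmm : pvMM row with
      | true =>
        have hpf : pvPF row = true := by unfold pvPF; rw [hA, hmm]; decide
        rw [hpf]; simp
      | false =>
        have hpf : pvPF row = false := by unfold pvPF; rw [hmm]; simp
        rw [hpf]; simpa using ih
    · have hbne : (pvLab row != "Activity") = true := by simpa using hA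
      have hpf : pvPF row = false := by
        unfold pvPF
        have h : (pvLab row == "Activity") = false := by simpa using hA
        rw [h]; simp
      rw [hbne, Bool.or_true, if_pos rfl, hpf, Bool.false_or]
      exact ih

theorem pvAltStep_eq (st : Bool × Bool × Bool) (row : List String) :
    pvAltStep st row = (st.1 || (pvLab row == "Subject Well"),
                        st.2.1 || (pvLab row == "Group Name"),
                        st.2.2 || pvPF row) := by
  obtain ⟨s, g, f⟩ := st
  show (if (pvLab row == "Subject Well") = true then (true, g, f)
        else if (pvLab row == "Group Name") = true then (s, true, f)
        else if ((pvLab row == "Activity") && !f) = true then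
          (if pvMM row = true then (s, g, true) else (s, g, f))
        else (s, g, f)) = _
  by_cases hS : pvLab row = "Subject Well"
  · have hpf : pvPF row = false := by unfold pvPF; rw [hS]; simp
    rw [if_pos (by simp [hS]), hS, hpf]
    simp
  · rw [if_neg (by simpa using hS)]
    have hS' : (pvLab row == "Subject Well") = false := by simpa using hS
    by_cases hG : pvLab row = "Group Name"
    · have hpf : pvPF row = false := by unfold pvPF; rw [hG]; simp
      rw [if_pos (by simp [hG]), hG, hpf]
      simp
    · rw [if_neg (by simpa using hG)]
      have hG' : (pvLab row == "Group Name") = false := by simpa using hG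
      by_cases hA : pvLab row = "Activity"
      · cases f with
        | true =>
          rw [if_neg (by simp)]
          simp [hS', hG']
        | false =>
          rw [if_pos (by simp [hA])]
          cases hmm : pvMM row with
          | true =>
            have hpf : pvPF row = true := by unfold pvPF; rw [hA, hmm]; decide
            simp [hS', hG', hpf]
          | false =>
            have hpf : pvPF row = false := by unfold pvPF; rw [hmm]; simp
            simp [hS', hG', hpf]
      · have hA' : (pvLab row == "Activity") = false := by simpa using hA
        rw [if_neg (by simp [hA'])]
        have hpf : pvPF row = false := by unfold pvPF; rw [hA']; simp
        simp [hS', hG', hpf]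

theorem pvFold_eq (rows : List (List String)) (s g f : Bool) :
    rows.foldl pvAltStep (s, g, f) =
      (s || rows.any (fun r => pvLab r == "Subject Well"),
       g || rows.any (fun r => pvLab r == "Group Name"),
       f || rows.any pvPF) := by
  induction rows generalizing s g f with
  | nil => simp
  | cons row rest ih =>
    rw [List.foldl_cons, pvAltStep_eq, ih]
    simp [Bool.or_assoc]

theorem pvContains_eq (rows : List (List String)) (x : String) :
    PySem.Set.contains (PySem.Set.ofList (rows.map (fun row => PySem.Str.strip (row.headD "")))) x
      = rows.any (fun r => pvLab r == x) := by
  cases hc : PySem.Set.contains (PySem.Set.ofList (rows.map (fun row => PySem.Str.strip (row.headD "")))) x with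
  | true =>
    rw [PySem.Set.contains_iff, PySem.Set.mem_ofList, List.mem_map] at hc
    obtain ⟨r, hr, he⟩ := hc
    symm; rw [List.any_eq_true]
    exact ⟨r, hr, beq_iff_eq.mpr he⟩
  | false =>
    symm; rw [Bool.eq_false_iff]
    intro hany
    rw [List.any_eq_true] at hany
    obtain ⟨r, hr, he⟩ := hany
    have hmem : x ∈ PySem.Set.ofList (rows.map (fun row => PySem.Str.strip (row.headD ""))) := by
      rw [PySem.Set.mem_ofList, List.mem_map]
      exact ⟨r, hr, eq_of_beq he⟩
    rw [← PySem.Set.contains_iff, hc] at hmem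
    exact absurd hmem (by decide)

theorem pvAny_act (rows : List (List String)) (h : rows.any pvPF = true) :
    rows.any (fun r => pvLab r == "Activity") = true := by
  rw [List.any_eq_true] at h ⊢
  obtain ⟨r, hr, he⟩ := h
  refine ⟨r, hr, ?_⟩
  unfold pvPF at he
  exact (Bool.and_eq_true _ _ ▸ he).1

-- ===== VERDICT (by name: the statement is the Claim_ definition above) =====
theorem looks_like_flat_time_csv_spec : Claim_equal_looks_like_flat_time_csv := by
  intro rows _
  unfold Spec_looks_like_flat_time_csv
  simp only [looks_like_flat_time_csv, looks_like_flat_time_csv_alt]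
  rw [pvContains_eq, pvContains_eq, pvContains_eq, pvFold_eq]
  simp only [Bool.false_or]
  cases h1 : rows.any (fun r => pvLab r == "Subject Well") with
  | false => simp
  | true =>
    cases h2 : rows.any (fun r => pvLab r == "Group Name") with
    | false => simp
    | true =>
      cases h3 : rows.any (fun r => pvLab r == "Activity") with
      | true => simp [pvActLoop_eq]
      | false =>
        have hL : rows.any pvPF = false := by
          cases hL : rows.any pvPF with
          | false => rfl
          | true => rw [pvAny_act rows hL] at h3; exact absurd h3 (by decide)
        simp [hL]
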